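-- pv_equiv track=rewrite | github.com/BalazsNyiro/ssp_structured_software_planner | src/debugger.py | find_line_with_sign
-- ===== SOURCE A (Python) =====
-- LineSep = "\n"
--
-- def find_line_with_sign(Txt, Sign, Separator="", WantedIndex=0, FirstOrLastResult="last"):
--     Ret = ""
--     for Line in Txt.split(LineSep):
--         if Sign == Line[0:len(Sign)]: # find sign at the beginning of the line
--             if Separator:
--                 Elems = Line.split(Separator)
--                 Ret = Elems[WantedIndex]
--             else:
--                 Ret = Line
--             if FirstOrLastResult == "first":
--                 break
--                 # else later we can catch another line
--     return Ret
-- ===== SOURCE B (Python) =====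
-- LineSep = "\n"
--
-- def find_line_with_sign(Txt, Sign, Separator="", WantedIndex=0, FirstOrLastResult="last"):
--     matches = [line for line in Txt.split(LineSep) if line.startswith(Sign)]
--     if not matches:
--         return ""
--     chosen = matches[0] if FirstOrLastResult == "first" else matches[-1]
--     if Separator:
--         return chosen.split(Separator)[WantedIndex]
--     return chosen
-- ===== Notes on version B (the rewrite author's own statement) =====
-- stated objective: simpler
-- what changed: B separates filtering from selection: it collects all lines whose prefix is Sign, picks the first or last one, and splits only that chosen line, instead of A's single pass that splits every matching line while maintaining a last-seen accumulator with a break.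
import Mathlib
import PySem

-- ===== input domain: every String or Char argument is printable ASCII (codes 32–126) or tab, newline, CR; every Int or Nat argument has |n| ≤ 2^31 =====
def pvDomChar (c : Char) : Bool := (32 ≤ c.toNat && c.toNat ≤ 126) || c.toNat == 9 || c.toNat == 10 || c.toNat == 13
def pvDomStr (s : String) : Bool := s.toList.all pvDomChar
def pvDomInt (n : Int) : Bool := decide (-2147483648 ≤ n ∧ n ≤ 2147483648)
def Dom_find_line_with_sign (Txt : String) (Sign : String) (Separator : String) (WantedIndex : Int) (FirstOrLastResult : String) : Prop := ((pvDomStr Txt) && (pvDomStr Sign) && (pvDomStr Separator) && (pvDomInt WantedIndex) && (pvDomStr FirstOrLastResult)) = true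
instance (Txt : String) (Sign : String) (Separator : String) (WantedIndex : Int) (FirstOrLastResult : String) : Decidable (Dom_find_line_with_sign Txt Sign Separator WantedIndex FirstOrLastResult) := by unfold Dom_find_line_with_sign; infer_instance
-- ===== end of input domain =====

-- B filters the matching lines once and then selects first/last and splits only the chosen
-- line, instead of A's single pass that re-splits every matching line (objective: simpler).

-- s.split(sep) for a NONEMPTY sep (exact there: PySem.Str.split? is none only for sep = "";
-- both ports only ever call it with a nonempty sep)
def pvSplit (s : String) (sep : String) : List String :=
  (PySem.Str.split? s sep).getD []

-- ===== PORT A =====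
def pvLineSep : String := "\n"

-- the for-loop of A; state Ret, 'none' = the IndexError of Elems[WantedIndex], break on "first"
def pvALoop (Sign : String) (Separator : String) (WantedIndex : Int)
    (FirstOrLastResult : String) (Ret : String) : List String → Option String
  | [] => some Ret
  | Line :: rest =>
    if Sign = PySem.Str.slice Line (some 0) (some (PySem.Str.len Sign)) then
      match (if Separator ≠ "" then
               PySem.List.pyGet? (pvSplit Line Separator) WantedIndex
             else some Line) with
      | none => none
      | some r =>
        if FirstOrLastResult = "first" then some r
        else pvALoop Sign Separator WantedIndex FirstOrLastResult r rest
    else pvALoop Sign Separator WantedIndex FirstOrLastResult Ret rest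

def find_line_with_sign (Txt : String) (Sign : String) (Separator : String) (WantedIndex : Int) (FirstOrLastResult : String) : String :=
  (pvALoop Sign Separator WantedIndex FirstOrLastResult "" (pvSplit Txt pvLineSep)).getD ""

-- ===== PORT B =====
def find_line_with_sign_alt (Txt : String) (Sign : String) (Separator : String) (WantedIndex : Int) (FirstOrLastResult : String) : String :=
  let hits := (pvSplit Txt "\n").filter (fun line => PySem.Str.startswith line Sign)
  match hits with
  | [] => ""
  | m :: ms =>
    let chosen := if FirstOrLastResult = "first" then m else (m :: ms).getLast (by simp)
    if Separator ≠ "" then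
      (PySem.List.pyGet? (pvSplit chosen Separator) WantedIndex).getD ""
    else chosen

-- ===== PRECONDITION & SPEC =====
def pvMatches (Txt : String) (Sign : String) : List String :=
  (pvSplit Txt "\n").filter (fun line => PySem.Str.startswith line Sign)

-- Pre_ excludes exactly the inputs on which A raises IndexError: a nonempty Separator with
-- WantedIndex out of range for the split of a matching line A processes (the first match in
-- "first" mode, every match otherwise).
def Pre_find_line_with_sign (Txt : String) (Sign : String) (Separator : String) (WantedIndex : Int) (FirstOrLastResult : String) : Prop :=
  Separator ≠ "" →
    (if FirstOrLastResult = "first" then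
       ∀ m, (pvMatches Txt Sign).head? = some m →
         PySem.Raise.InRange (pvSplit m Separator).length WantedIndex
     else
       ∀ m ∈ pvMatches Txt Sign,
         PySem.Raise.InRange (pvSplit m Separator).length WantedIndex)

instance (Txt : String) (Sign : String) (Separator : String) (WantedIndex : Int) (FirstOrLastResult : String) : Decidable (Pre_find_line_with_sign Txt Sign Separator WantedIndex FirstOrLastResult) := by unfold Pre_find_line_with_sign; infer_instance

def pvWitness_find_line_with_sign : String × String × String × Int × String :=
  ("s:1\ns:2\nx", "s", ":", 1, "last")

def Spec_find_line_with_sign (Txt : String) (Sign : String) (Separator : String) (WantedIndex : Int) (FirstOrLastResult : String) (out : String) : Prop := out = find_line_with_sign_alt Txt Sign Separator WantedIndex FirstOrLastResult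
instance (Txt : String) (Sign : String) (Separator : String) (WantedIndex : Int) (FirstOrLastResult : String) (out : String) : Decidable (Spec_find_line_with_sign Txt Sign Separator WantedIndex FirstOrLastResult out) := by unfold Spec_find_line_with_sign; infer_instance

-- ===== CLAIM (what is proved, stated in full; the proofs are below) =====
def Claim_equal_find_line_with_sign : Prop := ∀ (Txt : String) (Sign : String) (Separator : String) (WantedIndex : Int) (FirstOrLastResult : String), Dom_find_line_with_sign Txt Sign Separator WantedIndex FirstOrLastResult → Pre_find_line_with_sign Txt Sign Separator WantedIndex FirstOrLastResult → Spec_find_line_with_sign Txt Sign Separator WantedIndex FirstOrLastResult (find_line_with_sign Txt Sign Separator WantedIndex FirstOrLastResult)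

-- ===== LEMMAS AND PROOFS =====

-- A's prefix test 'Sign == Line[0:len(Sign)]' is B's 'Line.startswith(Sign)'
def pvExt (Separator : String) (WantedIndex : Int) (m : String) : Option String :=
  if Separator ≠ "" then PySem.List.pyGet? (pvSplit m Separator) WantedIndex
  else some m

theorem pv_prefix_bridge (Sign Line : String) :
    (Sign = PySem.Str.slice Line (some 0) (some (PySem.Str.len Sign))) ↔
      PySem.Str.startswith Line Sign = true := by
  have key : (PySem.Str.slice Line (some 0) (some (PySem.Str.len Sign))).toList
      = Line.toList.take Sign.toList.length := by
    rw [PySem.Str.toList_slice, PySem.Chars.slice_eq_listSlice, PySem.Str.len_eq,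
      PySem.List.slice_zero_start, PySem.List.slice_to_natCast]
  rw [PySem.Str.startswith_eq, PySem.Chars.startswith_iff, List.prefix_iff_eq_take,
    ← key, ← String.toList_inj]

theorem pvALoop_first (Sign Separator : String) (WantedIndex : Int)
    (ls : List String) (Ret : String) :
    pvALoop Sign Separator WantedIndex "first" Ret ls =
      match ls.filter (fun line => PySem.Str.startswith line Sign) with
      | [] => some Ret
      | m :: _ => pvExt Separator WantedIndex m := by
  induction ls generalizing Ret with
  | nil => simp [pvALoop]
  | cons l ls ih =>
    by_cases h : PySem.Str.startswith l Sign = true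
    · rw [pvALoop, if_pos ((pv_prefix_bridge Sign l).mpr h)]
      simp only [List.filter_cons, h, if_true]
      show (match pvExt Separator WantedIndex l with
            | none => none
            | some r => if "first" = "first" then some r
                        else pvALoop Sign Separator WantedIndex "first" r ls) = _
      cases pvExt Separator WantedIndex l <;> simp
    · rw [pvALoop, if_neg (fun hc => h ((pv_prefix_bridge Sign l).mp hc))]
      simp only [List.filter_cons, h]
      exact ih Ret

theorem pvALoop_last (Sign Separator : String) (WantedIndex : Int)
    (FirstOrLastResult : String) (hf : FirstOrLastResult ≠ "first")
    (ls : List String) (Ret : String)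
    (hall : ∀ m ∈ ls.filter (fun line => PySem.Str.startswith line Sign),
        (pvExt Separator WantedIndex m).isSome) :
    pvALoop Sign Separator WantedIndex FirstOrLastResult Ret ls =
      match (ls.filter (fun line => PySem.Str.startswith line Sign)).getLast? with
      | none => some Ret
      | some m => pvExt Separator WantedIndex m := by
  induction ls generalizing Ret with
  | nil => simp [pvALoop]
  | cons l ls ih =>
    by_cases h : PySem.Str.startswith l Sign = true
    · rw [pvALoop, if_pos ((pv_prefix_bridge Sign l).mpr h)]
      have hl : (pvExt Separator WantedIndex l).isSome := by
        apply hall; simp only [List.filter_cons, h, if_true]; exact List.mem_cons_self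
      obtain ⟨r, hr⟩ := Option.isSome_iff_exists.mp hl
      show (match pvExt Separator WantedIndex l with
            | none => none
            | some r => if FirstOrLastResult = "first" then some r
                        else pvALoop Sign Separator WantedIndex FirstOrLastResult r ls) = _
      rw [hr]
      simp only [if_neg hf]
      rw [ih r (fun m hm => hall m (by simp only [List.filter_cons, h, if_true]; exact List.mem_cons_of_mem _ hm))]
      simp only [List.filter_cons, h, if_true]
      cases hfl : ls.filter (fun line => PySem.Str.startswith line Sign) with
      | nil => simp [hr]
      | cons m ms =>
        cases hg : (m :: ms).getLast? with
        | none => simp at hg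
        | some g => simp [hg]
    · rw [pvALoop, if_neg (fun hc => h ((pv_prefix_bridge Sign l).mp hc)),
        ]
      simp only [List.filter_cons, h]
      exact ih Ret (fun m hm => hall m (by simp only [List.filter_cons, h]; exact hm))

-- ===== VERDICT (by name: the statement is the Claim_ definition above) =====
theorem find_line_with_sign_spec : Claim_equal_find_line_with_sign := by
  intro Txt Sign Separator WantedIndex FirstOrLastResult _ hpre
  unfold Spec_find_line_with_sign find_line_with_sign find_line_with_sign_alt
  unfold Pre_find_line_with_sign pvMatches at hpre
  simp only [pvLineSep]
  by_cases hfst : FirstOrLastResult = "first"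
  · subst hfst
    rw [pvALoop_first]
    cases hF : (pvSplit Txt "\n").filter (fun line => PySem.Str.startswith line Sign) with
    | nil => simp
    | cons m ms =>
      by_cases hs : Separator = "" <;> simp [pvExt, hs]
  · have hall : ∀ m ∈ (pvSplit Txt "\n").filter (fun line => PySem.Str.startswith line Sign),
        (pvExt Separator WantedIndex m).isSome := by
      intro m hm
      by_cases hs : Separator = ""
      · simp [pvExt, hs]
      · have hir := (if_neg hfst ▸ hpre hs) m hm
        simp only [pvExt, if_pos (hs : Separator ≠ "")]
        rcases ho : PySem.List.pyGet? (pvSplit m Separator) WantedIndex with _ | r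
        · exact absurd ((PySem.List.pyGet?_eq_none_iff _ _).mp ho) (fun hn => hn hir)
        · rfl
    rw [pvALoop_last Sign Separator WantedIndex FirstOrLastResult hfst _ _ hall]
    cases hF : (pvSplit Txt "\n").filter (fun line => PySem.Str.startswith line Sign) with
    | nil => simp
    | cons m ms =>
      simp only [List.getLast?_eq_some_getLast (l := m :: ms) (by simp)]
      have hmem : (m :: ms).getLast (by simp) ∈ (m :: ms) := List.getLast_mem _
      by_cases hs : Separator = "" <;> simp [pvExt, hs, hfst]
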